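-- pv_equiv track=rewrite | github.com/dizzydes/t2r | terraform_parser.py | _categorize_resources
-- ===== SOURCE A (Python) =====
-- def _categorize_resources(resources):
--     """Categorize resources by type"""
--     categorized = {
--         "compute": [],
--         "database": [],
--         "storage": [],
--         "networking": [],
--         "cdn": [],
--         "dns": [],
--         "serverless": [],
--         "other": []
--     }
--
--     for resource in resources:
--         res_type = resource["type"].lower()
--
--         # Compute resources
--         if any(x in res_type for x in ["ec2", "instance", "fargate", "ecs", "eks", "container"]):
--             categorized["compute"].append(resource)
--         # Database resources
--         elif any(x in res_type for x in ["rds", "db", "database", "aurora", "dynamodb", "elasticache", "redis"]):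
--             categorized["database"].append(resource)
--         # Storage resources
--         elif any(x in res_type for x in ["s3", "ebs", "efs", "storage", "bucket", "volume"]):
--             categorized["storage"].append(resource)
--         # Networking resources
--         elif any(x in res_type for x in ["vpc", "subnet", "security_group", "route", "gateway", "alb", "elb", "load_balancer"]):
--             categorized["networking"].append(resource)
--         # CDN resources
--         elif any(x in res_type for x in ["cloudfront", "cdn"]):
--             categorized["cdn"].append(resource)
--         # DNS resources
--         elif any(x in res_type for x in ["route53", "dns", "domain"]):
--             categorized["dns"].append(resource)
--         # Serverless resources
--         elif any(x in res_type for x in ["lambda", "function", "api_gateway"]):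
--             categorized["serverless"].append(resource)
--         else:
--             categorized["other"].append(resource)
--
--     return categorized
-- ===== SOURCE B (Python) =====
-- _CATEGORY_RULES = [
--     ("compute", ["ec2", "instance", "fargate", "ecs", "eks", "container"]),
--     ("database", ["rds", "db", "database", "aurora", "dynamodb", "elasticache", "redis"]),
--     ("storage", ["s3", "ebs", "efs", "storage", "bucket", "volume"]),
--     ("networking", ["vpc", "subnet", "security_group", "route", "gateway", "alb", "elb", "load_balancer"]),
--     ("cdn", ["cloudfront", "cdn"]),
--     ("dns", ["route53", "dns", "domain"]),
--     ("serverless", ["lambda", "function", "api_gateway"]),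
-- ]
--
--
-- def _classify(resource):
--     res_type = resource["type"].lower()
--     for name, keywords in _CATEGORY_RULES:
--         if any(k in res_type for k in keywords):
--             return name
--     return "other"
--
--
-- def _categorize_resources(resources):
--     names = [name for name, _ in _CATEGORY_RULES] + ["other"]
--     return {name: [r for r in resources if _classify(r) == name] for name in names}
-- ===== Notes on version B (the rewrite author's own statement) =====
-- stated objective: simpler
-- what changed: Replaces the eight-branch elif cascade appending into a mutable dict with a data-driven rules table: a _classify helper scans the ordered (category, keywords) list for the first substring match, and the result dict is built in one comprehension filtering the resources per category.
import Mathlib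
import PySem

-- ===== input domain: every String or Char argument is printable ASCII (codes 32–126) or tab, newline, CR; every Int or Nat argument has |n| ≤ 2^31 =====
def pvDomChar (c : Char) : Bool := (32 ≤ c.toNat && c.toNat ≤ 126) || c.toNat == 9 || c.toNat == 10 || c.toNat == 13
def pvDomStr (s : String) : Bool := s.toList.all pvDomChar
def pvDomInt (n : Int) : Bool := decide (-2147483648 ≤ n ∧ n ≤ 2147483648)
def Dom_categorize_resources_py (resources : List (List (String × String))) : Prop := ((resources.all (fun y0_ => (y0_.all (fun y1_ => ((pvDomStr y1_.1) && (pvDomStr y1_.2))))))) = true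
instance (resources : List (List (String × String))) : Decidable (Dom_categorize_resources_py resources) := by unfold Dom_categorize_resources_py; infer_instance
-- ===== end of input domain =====

-- B replaces A's eight-branch elif cascade over a mutable dict with an ordered rules
-- table: a classifier finds the first matching (category, keywords) rule and the result
-- is built per category by filtering; objective: simpler, same cost.

-- ===== PORT A =====
-- resource["type"] on an insertion-ordered assoc-list dict: first matching key
def pvTypeOf (resource : List (String × String)) : Option String :=
  (resource.find? (fun p => p.1 == "type")).map (·.2)

-- any(x in res_type for x in kws)
def pvAnyIn (kws : List String) (res_type : String) : Bool :=
  kws.any (fun k => PySem.Str.isIn k res_type)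

def pvInitA : PySem.Dict String (List (List (String × String))) :=
  ((((((((PySem.Dict.empty.insert "compute" []).insert "database" []).insert "storage" []).insert
    "networking" []).insert "cdn" []).insert "dns" []).insert "serverless" []).insert "other" [])

def pvStepA (categorized : PySem.Dict String (List (List (String × String))))
    (resource : List (String × String)) : PySem.Dict String (List (List (String × String))) :=
  match pvTypeOf resource with
  | none => categorized   -- Python raises KeyError here; excluded by Pre_
  | some ty =>
    let res_type := PySem.Str.lower ty
    if pvAnyIn ["ec2", "instance", "fargate", "ecs", "eks", "container"] res_type then
      categorized.modify "compute" [] (· ++ [resource])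
    else if pvAnyIn ["rds", "db", "database", "aurora", "dynamodb", "elasticache", "redis"] res_type then
      categorized.modify "database" [] (· ++ [resource])
    else if pvAnyIn ["s3", "ebs", "efs", "storage", "bucket", "volume"] res_type then
      categorized.modify "storage" [] (· ++ [resource])
    else if pvAnyIn ["vpc", "subnet", "security_group", "route", "gateway", "alb", "elb", "load_balancer"] res_type then
      categorized.modify "networking" [] (· ++ [resource])
    else if pvAnyIn ["cloudfront", "cdn"] res_type then
      categorized.modify "cdn" [] (· ++ [resource])
    else if pvAnyIn ["route53", "dns", "domain"] res_type then
      categorized.modify "dns" [] (· ++ [resource])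
    else if pvAnyIn ["lambda", "function", "api_gateway"] res_type then
      categorized.modify "serverless" [] (· ++ [resource])
    else
      categorized.modify "other" [] (· ++ [resource])

def categorize_resources_py (resources : List (List (String × String))) :
    List (String × List (List (String × String))) :=
  (resources.foldl pvStepA pvInitA).items

-- ===== PORT B =====
def pvRules : List (String × List String) :=
  [("compute", ["ec2", "instance", "fargate", "ecs", "eks", "container"]),
   ("database", ["rds", "db", "database", "aurora", "dynamodb", "elasticache", "redis"]),
   ("storage", ["s3", "ebs", "efs", "storage", "bucket", "volume"]),
   ("networking", ["vpc", "subnet", "security_group", "route", "gateway", "alb", "elb", "load_balancer"]),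
   ("cdn", ["cloudfront", "cdn"]),
   ("dns", ["route53", "dns", "domain"]),
   ("serverless", ["lambda", "function", "api_gateway"])]

def pvClassify (resource : List (String × String)) : String :=
  match pvTypeOf resource with
  | none => "other"   -- Python raises KeyError here; excluded by Pre_
  | some ty =>
    let res_type := PySem.Str.lower ty
    match pvRules.find? (fun rule => pvAnyIn rule.2 res_type) with
    | some rule => rule.1
    | none => "other"

def categorize_resources_py_alt (resources : List (List (String × String))) :
    List (String × List (List (String × String))) :=
  (pvRules.map (·.1) ++ ["other"]).map
    (fun name => (name, resources.filter (fun r => pvClassify r == name)))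

-- ===== PRECONDITION & SPEC =====
-- Pre_ excludes exactly the resources without a "type" key, on which Python A raises KeyError.
def Pre_categorize_resources_py (resources : List (List (String × String))) : Prop :=
  (resources.all (fun r => r.any (fun p => p.1 == "type"))) = true
instance (resources : List (List (String × String))) : Decidable (Pre_categorize_resources_py resources) := by unfold Pre_categorize_resources_py; infer_instance

def pvWitness_categorize_resources_py : (List (List (String × String))) :=
  [[("type", "aws_instance"), ("name", "web")], [("type", "aws_s3_bucket")]]

def Spec_categorize_resources_py (resources : List (List (String × String))) (out : List (String × List (List (String × String)))) : Prop := out = categorize_resources_py_alt resources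
instance (resources : List (List (String × String))) (out : List (String × List (List (String × String)))) : Decidable (Spec_categorize_resources_py resources out) := by unfold Spec_categorize_resources_py; infer_instance

-- ===== CLAIM (what is proved, stated in full; the proofs are below) =====
def Claim_equal_categorize_resources_py : Prop := ∀ (resources : List (List (String × String))), Dom_categorize_resources_py resources → Pre_categorize_resources_py resources → Spec_categorize_resources_py resources (categorize_resources_py resources)

-- ===== LEMMAS AND PROOFS =====

-- the eight category names, in A's insertion order
def pvKeys8 : List String :=
  ["compute", "database", "storage", "networking", "cdn", "dns", "serverless", "other"]

lemma pvClassify_mem (r : List (String × String)) : pvClassify r ∈ pvKeys8 := by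
  unfold pvClassify pvKeys8
  cases pvTypeOf r with
  | none => simp
  | some ty =>
    simp only
    cases hf : pvRules.find? (fun rule => pvAnyIn rule.2 (PySem.Str.lower ty)) with
    | none => simp
    | some rule =>
      have hm := List.mem_of_find?_eq_some hf
      simp [pvRules] at hm
      rcases hm with h | h | h | h | h | h | h <;> simp [h]

lemma pvStepA_eq_modify (r : List (String × String))
    (h : (r.any (fun p => p.1 == "type")) = true)
    (d : PySem.Dict String (List (List (String × String)))) :
    pvStepA d r = d.modify (pvClassify r) [] (· ++ [r]) := by
  cases hf : pvTypeOf r with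
  | none =>
    exfalso
    simp only [pvTypeOf, Option.map_eq_none_iff, List.find?_eq_none] at hf
    rcases List.any_eq_true.mp h with ⟨p, hp, hkey⟩
    exact absurd hkey (by simpa using hf p hp)
  | some ty =>
    unfold pvStepA pvClassify
    rw [hf]
    simp only [pvRules, List.find?]
    split_ifs <;> simp_all

-- ===== VERDICT (by name: the statement is the Claim_ definition above) =====
theorem categorize_resources_py_spec : Claim_equal_categorize_resources_py := by
  intro resources _hdom hpre
  unfold Spec_categorize_resources_py categorize_resources_py categorize_resources_py_alt
  have hpre' : ∀ r ∈ resources, (r.any (fun p => p.1 == "type")) = true := by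
    intro r hr; exact List.all_eq_true.mp hpre r hr
  rw [PySem.List.foldl_congr_mem resources pvStepA
      (fun d r => d.modify (pvClassify r) [] (· ++ [r])) pvInitA
      (fun d r hr => pvStepA_eq_modify r (hpre' r hr) d)]
  have hkeys : (resources.foldl (fun d r => d.modify (pvClassify r) [] (· ++ [r])) pvInitA).keys
      = pvKeys8 := by
    rw [PySem.Dict.keys_foldl_modify_key resources pvClassify [] (fun _ r v => v ++ [r]) pvInitA]
    rw [PySem.Set.update_eq_append_filter]
    have hfil : (PySem.Set.ofList (resources.map pvClassify)).filter
        (fun y => !(PySem.Set.contains pvInitA.keys y)) = [] := by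
      rw [List.filter_eq_nil_iff]
      intro y hy
      have hy' : y ∈ resources.map pvClassify := (PySem.Set.mem_ofList _ _).mp hy
      rcases List.mem_map.mp hy' with ⟨r, _, rfl⟩
      have hmem := pvClassify_mem r
      simp [pvKeys8] at hmem
      rcases hmem with h | h | h | h | h | h | h | h <;> rw [h] <;> decide
    rw [hfil]
    simp [pvInitA]
    rfl
  have hnd : (resources.foldl (fun d r => d.modify (pvClassify r) [] (· ++ [r])) pvInitA).keys.Nodup := by
    exact PySem.Dict.nodup_keys_foldl_modify_key resources pvClassify [] (fun _ r v => v ++ [r]) pvInitA (by decide)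
  rw [PySem.Dict.items_eq_map_keys _ hnd []]
  rw [hkeys]
  have hfold : (resources.foldl (fun d r => d.modify (pvClassify r) [] (· ++ [r])) pvInitA)
      = ((resources.map (fun r => (pvClassify r, r))).foldl
          (fun d p => d.modify p.1 [] (· ++ [p.2])) pvInitA) := by
    rw [List.foldl_map]
  have hgetD : ∀ c ∈ pvKeys8,
      (resources.foldl (fun d r => d.modify (pvClassify r) [] (· ++ [r])) pvInitA).getD c []
      = resources.filter (fun r => pvClassify r == c) := by
    intro c hc
    rw [hfold, PySem.Dict.getD_foldl_modify_append]
    have h0 : pvInitA.getD c [] = [] := by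
      simp [pvKeys8] at hc
      rcases hc with h | h | h | h | h | h | h | h <;> subst h <;> decide
    rw [h0, List.filter_map, List.map_map]
    simp [Function.comp_def]
  rw [List.map_congr_left (fun c hc => by rw [hgetD c hc])]
  simp [pvRules, pvKeys8]
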